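-- pv_equiv track=rewrite | github.com/krrishapatel/Jumble-Challenge | jumble_solver.py | find_sub_anagrams
-- ===== SOURCE A (Python) =====
-- from typing import List, Set
--
-- def letter_count(word: str) -> dict:
--     count = {}
--     for char in word:
--         count[char] = count.get(char, 0) + 1
--     return count
--
-- def find_sub_anagrams(letters: str, word_list: Set[str]) -> List[str]:
--     input_letter_count = letter_count(letters)
--     sub_anagrams = []
--     for word in word_list:
--         word_letter_count = letter_count(word)
--
--         # Check if the word can be formed using the given letters
--         is_sub_anagram = True
--         for char in word_letter_count:
--             if word_letter_count[char] > input_letter_count.get(char, 0):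
--                 is_sub_anagram = False
--                 break
--
--         if is_sub_anagram:
--             sub_anagrams.append(word)
--
--     return sub_anagrams
-- ===== SOURCE B (Python) =====
-- def find_sub_anagrams(letters, word_list):
--     result = []
--     for word in word_list:
--         pool = list(letters)
--         ok = True
--         for ch in word:
--             if ch in pool:
--                 pool.remove(ch)   # consume one occurrence
--             else:
--                 ok = False
--                 break
--         if ok:
--             result.append(word)
--     return result
-- ===== Notes on version B (the rewrite author's own statement) =====
-- stated objective: alternative
-- what changed: Replaces the frequency-table comparison (letter_count dicts with a keyed inner loop) by greedy pool consumption: each word is matched by removing its characters one at a time from a fresh mutable copy of the letters (list.remove), accepting the word iff every removal finds its character; no counts or tables anywhere.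
import Mathlib
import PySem

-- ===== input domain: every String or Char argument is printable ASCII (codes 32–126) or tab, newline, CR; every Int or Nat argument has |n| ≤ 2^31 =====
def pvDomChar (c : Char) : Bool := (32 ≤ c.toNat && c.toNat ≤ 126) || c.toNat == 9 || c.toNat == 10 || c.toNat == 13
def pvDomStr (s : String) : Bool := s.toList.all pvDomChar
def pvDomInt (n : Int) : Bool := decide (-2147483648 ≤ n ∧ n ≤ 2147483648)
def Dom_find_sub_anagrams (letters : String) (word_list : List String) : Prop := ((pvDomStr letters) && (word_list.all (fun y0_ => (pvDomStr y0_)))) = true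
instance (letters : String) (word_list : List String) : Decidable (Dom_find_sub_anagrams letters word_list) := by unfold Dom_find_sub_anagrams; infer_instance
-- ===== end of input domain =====

-- B drops A's letter_count tables entirely: a word is admitted by greedily removing its
-- characters from a fresh copy of the letter pool (alternative strategy, same output).

-- ===== PORT A =====
-- helper letter_count: dict built by count[char] = count.get(char, 0) + 1
def letter_count (word : String) : PySem.Dict Char Int :=
  word.toList.foldl (fun d c => d.insert c (d.getD c 0 + 1)) PySem.Dict.empty

-- inner 'for char in word_letter_count: if …: is_sub_anagram = False; break'
-- (word_letter_count[char] cannot miss since char ranges over its keys; ported via getD)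
def chkKeys (wc input : PySem.Dict Char Int) : List Char → Bool
  | [] => true
  | c :: rest =>
    if wc.getD c 0 > input.getD c 0 then false else chkKeys wc input rest

def find_sub_anagrams (letters : String) (word_list : List String) : List String :=
  let input_letter_count := letter_count letters
  word_list.foldl
    (fun sub_anagrams word =>
      let word_letter_count := letter_count word
      let is_sub_anagram := chkKeys word_letter_count input_letter_count word_letter_count.keys
      if is_sub_anagram then sub_anagrams ++ [word] else sub_anagrams)
    []

-- ===== PORT B =====
-- inner loop of Source B: consume each character of the word from the pool, or fail
-- ('ch in pool' then 'pool.remove(ch)' = erase the first occurrence)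
def consumes : List Char → List Char → Bool
  | [], _ => true
  | ch :: rest, pool => if ch ∈ pool then consumes rest (pool.erase ch) else false

def find_sub_anagrams_alt (letters : String) (word_list : List String) : List String :=
  word_list.foldl
    (fun result word =>
      if consumes word.toList letters.toList then result ++ [word] else result)
    []

-- ===== PRECONDITION & SPEC =====
def Spec_find_sub_anagrams (letters : String) (word_list : List String) (out : List String) : Prop := out = find_sub_anagrams_alt letters word_list
instance (letters : String) (word_list : List String) (out : List String) : Decidable (Spec_find_sub_anagrams letters word_list out) := by unfold Spec_find_sub_anagrams; infer_instance

-- ===== CLAIM (what is proved, stated in full; the proofs are below) =====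
def Claim_equal_find_sub_anagrams : Prop := ∀ (letters : String) (word_list : List String), Dom_find_sub_anagrams letters word_list → Spec_find_sub_anagrams letters word_list (find_sub_anagrams letters word_list)

-- ===== LEMMAS AND PROOFS =====

theorem letter_count_eq_counter (word : String) :
    letter_count word = PySem.Dict.counter word.toList := by
  simpa [letter_count] using
    PySem.Dict.foldl_insert_getD_add_one_eq_counter (xs := word.toList)

theorem chkKeys_eq_all (wc input : PySem.Dict Char Int) (l : List Char) :
    chkKeys wc input l = l.all (fun c => !(wc.getD c 0 > input.getD c 0)) := by
  induction l with
  | nil => rfl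
  | cons c rest ih =>
    by_cases h : wc.getD c 0 > input.getD c 0 <;> simp [chkKeys, h, ih]

-- A's per-word test, characterised by multiset count containment
theorem word_test_iff (letters word : String) :
    chkKeys (letter_count word) (letter_count letters) (letter_count word).keys = true
      ↔ ∀ c : Char, word.toList.count c ≤ letters.toList.count c := by
  rw [chkKeys_eq_all, letter_count_eq_counter, letter_count_eq_counter,
    PySem.Dict.keys_counter]
  simp only [List.all_eq_true, PySem.Set.mem_ofList, Bool.not_eq_true',
    decide_eq_false_iff_not, not_lt, PySem.Dict.getD_counter, Nat.cast_le]
  constructor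
  · intro h c
    by_cases hc : c ∈ word.toList
    · exact h c hc
    · simp [List.count_eq_zero_of_not_mem hc]
  · intro h c _
    exact h c

-- B's per-word test, characterised the same way
theorem consumes_iff (w : List Char) : ∀ pool : List Char,
    consumes w pool = true ↔ ∀ c : Char, w.count c ≤ pool.count c := by
  induction w with
  | nil => intro pool; simp [consumes]
  | cons ch rest ih =>
    intro pool
    by_cases hmem : ch ∈ pool
    · rw [consumes]
      simp only [hmem, if_pos, ih (pool.erase ch)]
      have hcp : 1 ≤ pool.count ch := List.one_le_count_iff.mpr hmem
      constructor
      · intro h c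
        have h2 := h c
        rw [List.count_erase] at h2
        rw [List.count_cons]
        by_cases hc : c = ch
        · subst hc; simp only [beq_self_eq_true, if_true] at h2 ⊢; omega
        · simp only [beq_iff_eq, (Ne.symm hc : ch ≠ c), if_false] at h2 ⊢; omega
      · intro h c
        have h2 := h c
        rw [List.count_cons] at h2
        rw [List.count_erase]
        by_cases hc : c = ch
        · subst hc; simp only [beq_self_eq_true, if_true] at h2 ⊢; omega
        · simp only [beq_iff_eq, (Ne.symm hc : ch ≠ c), if_false] at h2 ⊢; omega
    · rw [consumes]
      simp only [hmem]
      constructor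
      · intro h; exact absurd h (by simp)
      · intro h
        have := h ch
        rw [List.count_cons_self, List.count_eq_zero_of_not_mem hmem] at this
        omega

theorem tests_agree (letters word : String) :
    chkKeys (letter_count word) (letter_count letters) (letter_count word).keys
      = consumes word.toList letters.toList := by
  rw [Bool.eq_iff_iff, word_test_iff, consumes_iff]

-- ===== VERDICT (by name: the statement is the Claim_ definition above) =====
theorem find_sub_anagrams_spec : Claim_equal_find_sub_anagrams := by
  intro letters word_list _
  unfold Spec_find_sub_anagrams find_sub_anagrams find_sub_anagrams_alt
  simp only [tests_agree]
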